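-- pv_equiv track=rewrite | github.com/sproutsai-engg/coding_question_generator | json_files/python_codes/Q_1244.py | num_distinct_repeated_substrings
-- ===== SOURCE A (Python) =====
-- def num_distinct_repeated_substrings(s):
--     seen = set()
--     for length in range(len(s) // 2, 0, -1):
--         for i in range(len(s) - 2 * length + 1):
--             substr = s[i:i + length]
--             if substr in s[i + length:]:
--                 seen.add(substr)
--     return len(seen)
-- ===== SOURCE B (Python) =====
-- def num_distinct_repeated_substrings(s):
--     n = len(s)
--     total = 0
--     for length in range(1, n // 2 + 1):
--         occ = {}
--         for i in range(n - length + 1):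
--             t = s[i:i + length]
--             if t in occ:
--                 occ[t] = (occ[t][0], i)
--             else:
--                 occ[t] = (i, i)
--         total += sum(1 for (f, l) in occ.values() if l - f >= length)
--     return total
-- ===== Notes on version B (the rewrite author's own statement) =====
-- stated objective: alternative
-- what changed: Per substring length, B replaces A's per-start-position substring search of the remaining suffix by a single pass that records each distinct substring's first and last start position in a dictionary and counts those whose gap is at least the length (measured 2.56x faster at n=1024, but not confirmed at larger sizes).
import Mathlib
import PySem

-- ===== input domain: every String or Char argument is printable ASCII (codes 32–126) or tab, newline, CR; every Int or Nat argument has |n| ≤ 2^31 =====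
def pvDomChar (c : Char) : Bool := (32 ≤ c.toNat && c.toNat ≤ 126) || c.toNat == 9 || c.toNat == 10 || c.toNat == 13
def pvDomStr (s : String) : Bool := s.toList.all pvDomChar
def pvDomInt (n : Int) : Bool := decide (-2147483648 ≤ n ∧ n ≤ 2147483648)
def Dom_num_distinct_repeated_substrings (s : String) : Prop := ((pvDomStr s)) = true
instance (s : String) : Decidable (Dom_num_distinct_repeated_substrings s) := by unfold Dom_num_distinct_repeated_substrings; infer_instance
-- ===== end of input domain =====

-- B replaces A's per-start substring search of the remaining suffix by one dictionary pass per
-- length recording each distinct substring's first and last start position (repeat ⟺ gap ≥ length).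

-- ===== PORT A =====
def num_distinct_repeated_substrings (s : String) : Int :=
  let seen : PySem.Set String :=
    (PySem.List.pyRange (PySem.Int.floordiv (PySem.Str.len s) 2) 0 (-1)).foldl
      (fun seen length =>
        (PySem.List.pyRange 0 (PySem.Str.len s - 2 * length + 1)).foldl
          (fun seen i =>
            let substr := PySem.Str.slice s (some i) (some (i + length))
            if PySem.Str.isIn substr (PySem.Str.slice s (some (i + length)) none) then
              PySem.Set.add seen substr
            else seen)
          seen)
      PySem.Set.empty
  PySem.Set.len seen

-- ===== PORT B =====
def num_distinct_repeated_substrings_alt (s : String) : Int :=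
  let n := PySem.Str.len s
  (PySem.List.pyRange 1 (PySem.Int.floordiv n 2 + 1)).foldl
    (fun total length =>
      let occ : PySem.Dict String (Int × Int) :=
        (PySem.List.pyRange 0 (n - length + 1)).foldl
          (fun occ i =>
            let t := PySem.Str.slice s (some i) (some (i + length))
            match occ.get? t with
            | some p => occ.insert t (p.1, i)
            | none => occ.insert t (i, i))
          PySem.Dict.empty
      total + (occ.values.map (fun fl => if length ≤ fl.2 - fl.1 then (1 : Int) else 0)).sum)
    0

-- ===== PRECONDITION & SPEC =====
def Spec_num_distinct_repeated_substrings (s : String) (out : Int) : Prop := out = num_distinct_repeated_substrings_alt s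
instance (s : String) (out : Int) : Decidable (Spec_num_distinct_repeated_substrings s out) := by unfold Spec_num_distinct_repeated_substrings; infer_instance

-- ===== CLAIM (what is proved, stated in full; the proofs are below) =====
def Claim_equal_num_distinct_repeated_substrings : Prop := ∀ (s : String), Dom_num_distinct_repeated_substrings s → Spec_num_distinct_repeated_substrings s (num_distinct_repeated_substrings s)

-- ===== LEMMAS AND PROOFS =====

-- substring s[i:i+L]
def pvSub (s : String) (L i : Int) : String := PySem.Str.slice s (some i) (some (i + L))

-- the strings A adds at length L, in order
def pvListA (s : String) (L : Int) : List String :=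
  ((PySem.List.pyRange 0 (PySem.Str.len s - 2 * L + 1)).filter
      (fun i => PySem.Str.isIn (pvSub s L i) (PySem.Str.slice s (some (i + L)) none))).map (pvSub s L)

-- B's index range at length L
def pvIdxs (s : String) (L : Int) : List Int := PySem.List.pyRange 0 (PySem.Str.len s - L + 1)

-- start positions in I at which t occurs (as s[i:i+L])
def pvOccs (s : String) (L : Int) (I : List Int) (t : String) : List Int :=
  I.filter (fun i => pvSub s L i == t)

def pvFst (s : String) (L : Int) (I : List Int) (t : String) : Int :=
  ((pvOccs s L I t).head?).getD 0
def pvLst (s : String) (L : Int) (I : List Int) (t : String) : Int :=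
  ((pvOccs s L I t).getLast?).getD 0

-- B's inner loop body
def pvStep (s : String) (L : Int) (occ : PySem.Dict String (Int × Int)) (i : Int) :
    PySem.Dict String (Int × Int) :=
  let t := PySem.Str.slice s (some i) (some (i + L))
  match occ.get? t with
  | some p => occ.insert t (p.1, i)
  | none => occ.insert t (i, i)

def pvKeys (s : String) (L : Int) (I : List Int) : List String :=
  PySem.Set.ofList (I.map (pvSub s L))

-- ---------- generic set lemmas ----------

lemma set_add_mem (u : PySem.Set String) (x : String) (h : x ∈ u) :
    PySem.Set.add u x = u := by
  simp [PySem.Set.add, PySem.Set.contains, h]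

lemma set_add_fresh (u : PySem.Set String) (x : String) (h : x ∉ u) :
    PySem.Set.add u x = u ++ [x] := by
  simp [PySem.Set.add, PySem.Set.contains, h]

lemma set_update_append (u t : PySem.Set String) (ys : List String)
    (h : ∀ y ∈ ys, y ∉ u) :
    PySem.Set.update (u ++ t) ys = u ++ PySem.Set.update t ys := by
  induction ys generalizing t with
  | nil => rfl
  | cons y ys ih =>
    have hy : y ∉ u := h y (List.mem_cons_self ..)
    have hys : ∀ z ∈ ys, z ∉ u := fun z hz => h z (List.mem_cons_of_mem _ hz)
    show PySem.Set.update (PySem.Set.add (u ++ t) y) ys = u ++ PySem.Set.update (PySem.Set.add t y) ys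
    have hadd : PySem.Set.add (u ++ t) y = u ++ PySem.Set.add t y := by
      simp only [PySem.Set.add, PySem.Set.contains, List.contains_append]
      have hcu : List.contains u y = false := by simpa using hy
      rw [hcu]
      simp only [Bool.false_or]
      split <;> simp
    rw [hadd, ih _ hys]

lemma set_update_fresh (s0 : PySem.Set String) (ys : List String)
    (h : ∀ y ∈ ys, y ∉ s0) :
    PySem.Set.update s0 ys = s0 ++ PySem.Set.ofList ys := by
  have := set_update_append s0 [] ys h
  simpa [PySem.Set.update, PySem.Set.ofList, PySem.Set.empty] using this

lemma ofList_card (ys : List String) :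
    (PySem.Set.ofList ys).length = ys.toFinset.card := by
  have hnd := PySem.Set.nodup_ofList ys
  have hfs : (PySem.Set.ofList ys).toFinset = ys.toFinset := by
    ext x; simp [PySem.Set.mem_ofList]
  calc (PySem.Set.ofList ys).length = (PySem.Set.ofList ys).toFinset.card := by
        rw [List.toFinset_card_of_nodup hnd]
    _ = ys.toFinset.card := by rw [hfs]

-- ---------- A's outer fold ----------

lemma outer_fold (s : String) (Ls : List Int) (s0 : PySem.Set String)
    (hnd : Ls.Pairwise (· ≠ ·))
    (hs0 : ∀ x ∈ s0, ∀ L ∈ Ls, ((x.toList.length : Int)) ≠ L)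
    (hlen : ∀ L ∈ Ls, ∀ x ∈ pvListA s L, ((x.toList.length : Int)) = L) :
    ((Ls.foldl (fun seen L => PySem.Set.update seen (pvListA s L)) s0).length : Int)
      = (s0.length : Int) + (Ls.map (fun L => ((pvListA s L).toFinset.card : Int))).sum := by
  induction Ls generalizing s0 with
  | nil => simp
  | cons L Ls ih =>
    have hLmem : L ∈ L :: Ls := List.mem_cons_self ..
    have hfresh : ∀ y ∈ pvListA s L, y ∉ s0 := by
      intro y hy hmem
      exact hs0 y hmem L hLmem (hlen L hLmem y hy)
    simp only [List.foldl_cons]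
    rw [set_update_fresh s0 _ hfresh]
    have hs0' : ∀ x ∈ s0 ++ PySem.Set.ofList (pvListA s L), ∀ L' ∈ Ls, ((x.toList.length : Int)) ≠ L' := by
      intro x hx L' hL'
      rcases List.mem_append.mp hx with hx | hx
      · exact hs0 x hx L' (List.mem_cons_of_mem _ hL')
      · have hx' : x ∈ pvListA s L := (PySem.Set.mem_ofList _ _).mp hx
        have := hlen L hLmem x hx'
        rw [this]
        exact fun hcon => (List.rel_of_pairwise_cons hnd hL') hcon
    have ih' := ih (s0 ++ PySem.Set.ofList (pvListA s L)) hnd.of_cons hs0'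
      (fun L' hL' => hlen L' (List.mem_cons_of_mem _ hL'))
    rw [ih']
    simp only [List.length_append, ofList_card, List.map_cons, List.sum_cons]
    push_cast
    ring

-- ---------- ranges ----------

lemma pyRange_desc (m : Int) (h : 0 ≤ m) :
    PySem.List.pyRange m 0 (-1) = (List.range m.toNat).map (fun k : Nat => m - (k : Int)) := by
  simp only [PySem.List.pyRange]
  rw [if_neg (by norm_num : ¬((-1 : Int) = 0))]
  rw [if_neg (by norm_num : ¬((0 : Int) < -1))]
  by_cases h1 : (0 : Int) < m
  · rw [if_pos h1]
    have hc : ((m - 0 + - -1 - 1) / - -1).toNat = m.toNat := by norm_num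
    rw [hc]
    apply List.map_congr_left
    intro k _
    ring
  · rw [if_neg h1]
    have : m.toNat = 0 := by omega
    simp [this]

lemma pyRange_asc (m : Int) (h : 0 ≤ m) :
    PySem.List.pyRange 1 (m + 1) 1 = (List.range m.toNat).map (fun k : Nat => 1 + (k : Int)) := by
  simp only [PySem.List.pyRange]
  rw [if_neg (by norm_num : ¬((1 : Int) = 0))]
  rw [if_pos (by norm_num : (0 : Int) < 1)]
  by_cases h1 : (1 : Int) < m + 1
  · rw [if_pos h1]
    have hc : ((m + 1 - 1 + 1 - 1) / 1).toNat = m.toNat := by omega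
    rw [hc]
    apply List.map_congr_left
    intro k _
    ring
  · rw [if_neg h1]
    have : m.toNat = 0 := by omega
    simp [this]

lemma pyRange_zero_to (b : Int) :
    PySem.List.pyRange 0 b 1 = (List.range b.toNat).map (fun k : Nat => (k : Int)) := by
  simp only [PySem.List.pyRange]
  rw [if_neg (by norm_num : ¬((1 : Int) = 0))]
  rw [if_pos (by norm_num : (0 : Int) < 1)]
  by_cases h1 : (0 : Int) < b
  · rw [if_pos h1]
    have hc : ((b - 0 + 1 - 1) / 1).toNat = b.toNat := by omega
    rw [hc]
    apply List.map_congr_left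
    intro k _
    ring
  · rw [if_neg h1]
    have : b.toNat = 0 := by omega
    simp [this]

lemma idxs_sorted (s : String) (L : Int) : (pvIdxs s L).Pairwise (· < ·) := by
  unfold pvIdxs
  rw [pyRange_zero_to]
  exact List.pairwise_lt_range.map _ (fun a b hab => by exact_mod_cast hab)

lemma mem_idxs (s : String) (L i : Int) :
    i ∈ pvIdxs s L ↔ 0 ≤ i ∧ i < PySem.Str.len s - L + 1 := by
  unfold pvIdxs
  exact PySem.List.mem_pyRange_one

-- ---------- slices ----------

lemma sub_toList (s : String) (L i : Int) (hi : 0 ≤ i) (hL : 0 ≤ L) :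
    (pvSub s L i).toList = (s.toList.drop i.toNat).take L.toNat := by
  unfold pvSub
  rw [PySem.Str.toList_slice, PySem.Chars.slice_eq_listSlice, PySem.List.slice_toNat]
  · congr 1
    omega
  · omega
  · omega

lemma sub_len (s : String) (L i : Int) (hi : 0 ≤ i) (hL : 0 ≤ L)
    (hle : i + L ≤ (s.toList.length : Int)) :
    ((pvSub s L i).toList.length : Int) = L := by
  rw [sub_toList s L i hi hL]
  simp only [List.length_take, List.length_drop]
  omega

lemma sub_eq_iff_prefix_drop (s : String) (L i : Int) (hi : 0 ≤ i) (hL : 0 ≤ L)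
    (hle : i + L ≤ (s.toList.length : Int)) (t : String)
    (hlen : (t.toList.length : Int) = L) :
    pvSub s L i = t ↔ t.toList <+: s.toList.drop i.toNat := by
  rw [← String.toList_inj, sub_toList s L i hi hL]
  rw [List.prefix_iff_eq_take]
  constructor
  · intro h
    rw [← h]
    congr 1
    simp only [List.length_take, List.length_drop]
    omega
  · intro h
    rw [h]
    congr 1
    omega

lemma isIn_suffix_eq (s u : String) (a : Int) (ha : 0 ≤ a) :
    PySem.Str.isIn u (PySem.Str.slice s (some a) none)
      = PySem.Chars.isIn u.toList (s.toList.drop a.toNat) := by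
  show PySem.Chars.isIn u.toList (PySem.Str.slice s (some a) none).toList = _
  rw [PySem.Str.toList_slice, PySem.Chars.slice_eq_listSlice, PySem.List.slice_from _ ha]

-- ---------- sorted list head/last ----------

lemma head_min_of_sorted {l : List Int} (h : l.Pairwise (· < ·)) (hne : l ≠ []) :
    ∃ f, l.head? = some f ∧ f ∈ l ∧ ∀ x ∈ l, f ≤ x := by
  cases l with
  | nil => exact absurd rfl hne
  | cons a l =>
    refine ⟨a, rfl, List.mem_cons_self .., ?_⟩
    intro x hx
    rcases List.mem_cons.mp hx with rfl | hx
    · exact le_refl _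
    · exact le_of_lt (List.rel_of_pairwise_cons h hx)

lemma last_max_of_sorted {l : List Int} (h : l.Pairwise (· < ·)) (hne : l ≠ []) :
    ∃ g, l.getLast? = some g ∧ g ∈ l ∧ ∀ x ∈ l, x ≤ g := by
  induction l with
  | nil => exact absurd rfl hne
  | cons a l ih =>
    cases l with
    | nil =>
      refine ⟨a, rfl, List.mem_cons_self .., ?_⟩
      intro x hx
      simp at hx
      exact le_of_eq hx
    | cons b l =>
      obtain ⟨g, hg, hgm, hall⟩ := ih h.of_cons (by simp)
      refine ⟨g, ?_, List.mem_cons_of_mem _ hgm, ?_⟩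
      · rw [List.getLast?_cons_cons]; exact hg
      · intro x hx
        rcases List.mem_cons.mp hx with rfl | hx
        · exact le_of_lt (List.rel_of_pairwise_cons h hgm)
        · exact hall x hx

-- ---------- occurrence lists ----------

lemma occs_append (s : String) (L : Int) (I : List Int) (i : Int) (t : String) :
    pvOccs s L (I ++ [i]) t
      = pvOccs s L I t ++ (if pvSub s L i = t then [i] else []) := by
  unfold pvOccs
  rw [List.filter_append]
  congr 1
  split <;> simp_all

lemma occs_ne_nil_iff (s : String) (L : Int) (I : List Int) (t : String) :
    pvOccs s L I t ≠ [] ↔ t ∈ I.map (pvSub s L) := by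
  unfold pvOccs
  constructor
  · intro h
    rcases List.exists_mem_of_ne_nil _ h with ⟨x, hx⟩
    rcases List.mem_filter.mp hx with ⟨hm, hp⟩
    exact List.mem_map.mpr ⟨x, hm, by simpa using hp⟩
  · rintro h hnil
    rcases List.mem_map.mp h with ⟨i, hi, hsub⟩
    have : i ∈ I.filter (fun i => pvSub s L i == t) :=
      List.mem_filter.mpr ⟨hi, by simp [hsub]⟩
    rw [hnil] at this
    cases this

lemma fst_append_mem (s : String) (L : Int) (I : List Int) (i : Int) (t : String)
    (h : t ∈ I.map (pvSub s L)) : pvFst s L (I ++ [i]) t = pvFst s L I t := by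
  unfold pvFst
  rw [occs_append]
  rw [List.head?_append]
  rcases hne : (pvOccs s L I t).head? with _ | f
  · exact absurd (List.head?_eq_none_iff.mp hne) ((occs_ne_nil_iff s L I t).mpr h)
  · rfl

lemma lst_append_self (s : String) (L : Int) (I : List Int) (i : Int) (t : String)
    (h : pvSub s L i = t) : pvLst s L (I ++ [i]) t = i := by
  unfold pvLst
  rw [occs_append, if_pos h, List.getLast?_concat]
  rfl

lemma occs_append_other (s : String) (L : Int) (I : List Int) (i : Int) (t : String)
    (h : pvSub s L i ≠ t) : pvOccs s L (I ++ [i]) t = pvOccs s L I t := by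
  rw [occs_append, if_neg h, List.append_nil]

-- ---------- dict lemmas ----------

lemma find?_beq_self (l : List String) (a : String) :
    l.find? (fun x => x == a) = if a ∈ l then some a else none := by
  induction l with
  | nil => simp
  | cons b l ih =>
    by_cases hb : b = a
    · subst hb; simp
    · simp [hb, ih]
      have hiff : (a = b ∨ a ∈ l) ↔ a ∈ l :=
        ⟨fun h => h.resolve_left (fun e => hb e.symm), Or.inr⟩
      exact (if_congr hiff rfl rfl).symm

lemma dict_get?_of_items (d : PySem.Dict String (Int × Int)) (s : String) (L : Int)
    (I : List Int) (t : String)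
    (hitems : d.items = (pvKeys s L I).map (fun u => (u, (pvFst s L I u, pvLst s L I u)))) :
    d.get? t = if t ∈ pvKeys s L I then some (pvFst s L I t, pvLst s L I t) else none := by
  show (d.items.find? (fun p => p.1 == t)).map (fun p => p.2) = _
  rw [hitems, List.find?_map]
  have hcomp : ((fun p : String × (Int × Int) => p.1 == t) ∘
      (fun u => (u, (pvFst s L I u, pvLst s L I u)))) = (fun u => u == t) := rfl
  rw [hcomp, find?_beq_self]
  split <;> simp

lemma dict_contains_of_items (d : PySem.Dict String (Int × Int)) (s : String) (L : Int)
    (I : List Int) (t : String)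
    (hitems : d.items = (pvKeys s L I).map (fun u => (u, (pvFst s L I u, pvLst s L I u)))) :
    d.contains t = decide (t ∈ pvKeys s L I) := by
  show (d.items.any (fun p => p.1 == t)) = _
  rw [hitems, List.any_map]
  by_cases hm : t ∈ pvKeys s L I
  · simp only [hm, decide_true]
    rw [List.any_eq_true]
    exact ⟨t, hm, by simp⟩
  · simp only [hm, decide_false]
    rw [List.any_eq_false]
    intro u hu
    simp only [Function.comp]
    simp only [beq_iff_eq]
    rintro rfl
    exact hm hu

lemma insert_items (d : PySem.Dict String (Int × Int)) (k : String) (v : Int × Int) :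
    (d.insert k v).items = if d.contains k = true
      then d.items.map (fun p => if p.1 == k then (k, v) else p)
      else d.items ++ [(k, v)] := by
  unfold PySem.Dict.insert
  split <;> rfl

lemma keys_concat (s : String) (L : Int) (I : List Int) (i : Int) :
    pvKeys s L (I ++ [i]) = PySem.Set.add (pvKeys s L I) (pvSub s L i) := by
  unfold pvKeys
  rw [List.map_append]
  show (I.map (pvSub s L) ++ [pvSub s L i]).foldl PySem.Set.add PySem.Set.empty = _
  rw [List.foldl_append]
  rfl

lemma dict_invariant (s : String) (L : Int) (I : List Int) :
    (I.foldl (pvStep s L) PySem.Dict.empty).items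
      = (pvKeys s L I).map (fun u => (u, (pvFst s L I u, pvLst s L I u))) := by
  induction I using List.reverseRecOn with
  | nil => rfl
  | append_singleton I i ih =>
    rw [List.foldl_append, List.foldl_cons, List.foldl_nil]
    set d := I.foldl (pvStep s L) PySem.Dict.empty with hd
    have hget := dict_get?_of_items d s L I (pvSub s L i) ih
    have hcont := dict_contains_of_items d s L I (pvSub s L i) ih
    by_cases hmem : pvSub s L i ∈ pvKeys s L I
    · -- existing key: overwrite in place
      have hmem' : pvSub s L i ∈ I.map (pvSub s L) := (PySem.Set.mem_ofList _ _).mp hmem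
      have hstep : pvStep s L d i
          = d.insert (pvSub s L i) (pvFst s L I (pvSub s L i), i) := by
        show (match d.get? (pvSub s L i) with
          | some p => d.insert (pvSub s L i) (p.1, i)
          | none => d.insert (pvSub s L i) (i, i)) = _
        rw [hget, if_pos hmem]
      rw [hstep, insert_items, hcont]
      simp only [hmem, decide_true, if_true]
      rw [keys_concat, set_add_mem _ _ hmem, ih, List.map_map]
      apply List.map_congr_left
      intro u hu
      by_cases hut : u = pvSub s L i
      · have h1 : pvFst s L (I ++ [i]) u = pvFst s L I u :=
          fst_append_mem s L I i u (by rw [hut]; exact hmem')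
        have h2 : pvLst s L (I ++ [i]) u = i := lst_append_self s L I i u hut.symm
        rw [hut] at h1 h2
        simp [Function.comp, hut, h1, h2]
      · have hocc : pvOccs s L (I ++ [i]) u = pvOccs s L I u :=
          occs_append_other s L I i u (fun hcon => hut hcon.symm)
        have h1 : pvFst s L (I ++ [i]) u = pvFst s L I u := by unfold pvFst; rw [hocc]
        have h2 : pvLst s L (I ++ [i]) u = pvLst s L I u := by unfold pvLst; rw [hocc]
        simp [Function.comp, hut, h1, h2]
    · -- fresh key: append
      have hstep : pvStep s L d i = d.insert (pvSub s L i) (i, i) := by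
        show (match d.get? (pvSub s L i) with
          | some p => d.insert (pvSub s L i) (p.1, i)
          | none => d.insert (pvSub s L i) (i, i)) = _
        rw [hget, if_neg hmem]
      rw [hstep, insert_items, hcont]
      simp only [hmem, decide_false, Bool.false_eq_true, if_false]
      have hmem' : pvSub s L i ∉ I.map (pvSub s L) :=
        fun hcon => hmem ((PySem.Set.mem_ofList _ _).mpr hcon)
      rw [keys_concat, set_add_fresh _ _ hmem, ih, List.map_append]
      congr 1
      · apply List.map_congr_left
        intro u hu
        have hut : pvSub s L i ≠ u := fun hcon => hmem (hcon ▸ hu)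
        have hocc : pvOccs s L (I ++ [i]) u = pvOccs s L I u := occs_append_other s L I i u hut
        have h1 : pvFst s L (I ++ [i]) u = pvFst s L I u := by unfold pvFst; rw [hocc]
        have h2 : pvLst s L (I ++ [i]) u = pvLst s L I u := by unfold pvLst; rw [hocc]
        rw [h1, h2]
      · simp only [List.map_cons, List.map_nil]
        have hocc0 : pvOccs s L I (pvSub s L i) = [] := by
          by_contra hcon
          exact hmem' ((occs_ne_nil_iff s L I _).mp hcon)
        have hocc : pvOccs s L (I ++ [i]) (pvSub s L i) = [i] := by
          rw [occs_append, if_pos rfl, hocc0, List.nil_append]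
        unfold pvFst pvLst
        rw [hocc]
        rfl

lemma dict_count (s : String) (L : Int) (I : List Int) :
    (((I.foldl (pvStep s L) PySem.Dict.empty).values).map
        (fun fl => if L ≤ fl.2 - fl.1 then (1 : Int) else 0)).sum
      = (((I.map (pvSub s L)).toFinset.filter
          (fun t => L ≤ pvLst s L I t - pvFst s L I t)).card : Int) := by
  have hv : (I.foldl (pvStep s L) PySem.Dict.empty).values
      = (pvKeys s L I).map (fun u => (pvFst s L I u, pvLst s L I u)) := by
    show ((I.foldl (pvStep s L) PySem.Dict.empty).items).map (fun x => x.2) = _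
    rw [dict_invariant, List.map_map]
    rfl
  rw [hv]
  have hif : (fun fl : Int × Int => if L ≤ fl.2 - fl.1 then (1 : Int) else 0)
      = (fun fl : Int × Int => if (decide (L ≤ fl.2 - fl.1)) = true then (1 : Int) else 0) := by
    funext fl
    by_cases h : L ≤ fl.2 - fl.1 <;> simp [h]
  rw [hif, PySem.List.sum_map_ite_one_zero, List.countP_map]
  norm_cast
  have hnd : (pvKeys s L I).Nodup := PySem.Set.nodup_ofList _
  rw [List.countP_eq_length_filter]
  have hfnd : ((pvKeys s L I).filter
      ((fun fl : Int × Int => decide (L ≤ fl.2 - fl.1)) ∘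
        (fun u => (pvFst s L I u, pvLst s L I u)))).Nodup := hnd.filter _
  rw [← List.toFinset_card_of_nodup hfnd]
  have hfs : ((pvKeys s L I).filter
      ((fun fl : Int × Int => decide (L ≤ fl.2 - fl.1)) ∘
        (fun u => (pvFst s L I u, pvLst s L I u)))).toFinset
      = ((I.map (pvSub s L)).toFinset.filter
          (fun t => L ≤ pvLst s L I t - pvFst s L I t)) := by
    rw [List.toFinset_filter]
    ext t
    simp only [Finset.mem_filter, List.mem_toFinset, Function.comp, decide_eq_true_eq]
    constructor
    · rintro ⟨h1, h2⟩
      exact ⟨(PySem.Set.mem_ofList _ _).mp h1, h2⟩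
    · rintro ⟨h1, h2⟩
      exact ⟨(PySem.Set.mem_ofList _ _).mpr h1, h2⟩
  rw [hfs]

-- ---------- the core combinatorial identity ----------

lemma core (s : String) (L : Int) (hL : 1 ≤ L) :
    (pvListA s L).toFinset
      = ((pvIdxs s L).map (pvSub s L)).toFinset.filter
          (fun t => L ≤ pvLst s L (pvIdxs s L) t - pvFst s L (pvIdxs s L) t) := by
  have hn : PySem.Str.len s = (s.toList.length : Int) := PySem.Str.len_eq s
  have hsorted := idxs_sorted s L
  ext t
  simp only [List.mem_toFinset, Finset.mem_filter]
  constructor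
  · intro ht
    rcases List.mem_map.mp ht with ⟨i, hi, hsub⟩
    rcases List.mem_filter.mp hi with ⟨hir, hcond⟩
    rcases PySem.List.mem_pyRange_one.mp hir with ⟨hi0, hilt⟩
    have hiL : i + L ≤ (s.toList.length : Int) := by omega
    have htlen : ((t.toList.length : Int)) = L := by
      rw [← hsub]; exact sub_len s L i hi0 (by omega) hiL
    -- decode the containment test
    have hcond' : PySem.Chars.isIn t.toList (s.toList.drop (i + L).toNat) = true := by
      have := isIn_suffix_eq s (pvSub s L i) (i + L) (by omega)
      rw [this, hsub] at hcond
      exact hcond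
    obtain ⟨j, hpre⟩ := (PySem.Chars.exists_prefix_drop_iff_isIn _ _).mpr hcond'
    rw [List.drop_drop] at hpre
    set p : Nat := (i + L).toNat + j with hp
    have hplen : t.toList.length + p ≤ s.toList.length := by
      have := hpre.length_le
      simp only [List.length_drop] at this
      omega
    have hpi : (i + L : Int) ≤ (p : Int) := by
      rw [hp]; omega
    have hple : (p : Int) + L ≤ (s.toList.length : Int) := by omega
    have hpidx : (p : Int) ∈ pvIdxs s L := by
      rw [mem_idxs, hn]
      omega
    have hsubp : pvSub s L (p : Int) = t := by
      rw [sub_eq_iff_prefix_drop s L (p : Int) (by omega) (by omega) hple t htlen]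
      simpa using hpre
    have hiidx : i ∈ pvIdxs s L := by
      rw [mem_idxs, hn]; omega
    have hocc_ne : pvOccs s L (pvIdxs s L) t ≠ [] := by
      rw [occs_ne_nil_iff]
      exact List.mem_map.mpr ⟨(p : Int), hpidx, hsubp⟩
    have hso : (pvOccs s L (pvIdxs s L) t).Pairwise (· < ·) := hsorted.filter _
    obtain ⟨f, hf, _, hfall⟩ := head_min_of_sorted hso hocc_ne
    obtain ⟨g, hg, _, hgall⟩ := last_max_of_sorted hso hocc_ne
    have hiocc : i ∈ pvOccs s L (pvIdxs s L) t :=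
      List.mem_filter.mpr ⟨hiidx, by simp [hsub]⟩
    have hpocc : (p : Int) ∈ pvOccs s L (pvIdxs s L) t :=
      List.mem_filter.mpr ⟨hpidx, by simp [hsubp]⟩
    refine ⟨List.mem_map.mpr ⟨(p : Int), hpidx, hsubp⟩, ?_⟩
    have h1 : f ≤ i := hfall i hiocc
    have h2 : (p : Int) ≤ g := hgall _ hpocc
    unfold pvFst pvLst
    rw [hf, hg]
    show L ≤ g - f
    omega
  · rintro ⟨htm, hgap⟩
    have hocc_ne : pvOccs s L (pvIdxs s L) t ≠ [] := (occs_ne_nil_iff s L _ t).mpr htm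
    have hso : (pvOccs s L (pvIdxs s L) t).Pairwise (· < ·) := hsorted.filter _
    obtain ⟨f, hf, hfm, hfall⟩ := head_min_of_sorted hso hocc_ne
    obtain ⟨g, hg, hgm, hgall⟩ := last_max_of_sorted hso hocc_ne
    unfold pvFst pvLst at hgap
    rw [hf, hg] at hgap
    have hgap' : L ≤ g - f := hgap
    rcases List.mem_filter.mp hfm with ⟨hfidx, hfsub⟩
    rcases List.mem_filter.mp hgm with ⟨hgidx, hgsub⟩
    have hfsub' : pvSub s L f = t := by simpa using hfsub
    have hgsub' : pvSub s L g = t := by simpa using hgsub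
    rcases (mem_idxs s L f).mp hfidx with ⟨hf0, _⟩
    rcases (mem_idxs s L g).mp hgidx with ⟨hg0, hglt⟩
    rw [hn] at hglt
    have hfg : f ≤ g := by omega
    -- A's witness: start position f
    apply List.mem_map.mpr
    refine ⟨f, List.mem_filter.mpr ⟨?_, ?_⟩, hfsub'⟩
    · rw [PySem.List.mem_pyRange_one, hn]
      omega
    · rw [isIn_suffix_eq s _ (f + L) (by omega), hfsub']
      apply (PySem.Chars.exists_prefix_drop_iff_isIn _ _).mp
      refine ⟨g.toNat - (f + L).toNat, ?_⟩
      rw [List.drop_drop]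
      have harith : (f + L).toNat + (g.toNat - (f + L).toNat) = g.toNat := by omega
      rw [harith]
      have htg : t.toList = (s.toList.drop g.toNat).take L.toNat := by
        rw [← hgsub', sub_toList s L g hg0 (by omega)]
      rw [htg]
      exact List.take_prefix _ _
  
-- ---------- fold shapes ----------

lemma innerA_eq (s : String) (L : Int) (seen : PySem.Set String) :
    (PySem.List.pyRange 0 (PySem.Str.len s - 2 * L + 1)).foldl
      (fun seen i =>
        if PySem.Str.isIn (PySem.Str.slice s (some i) (some (i + L)))
            (PySem.Str.slice s (some (i + L)) none) then
          PySem.Set.add seen (PySem.Str.slice s (some i) (some (i + L)))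
        else seen) seen
      = PySem.Set.update seen (pvListA s L) := by
  rw [PySem.List.foldl_if_eq_foldl_filter
    (p := fun i => PySem.Str.isIn (PySem.Str.slice s (some i) (some (i + L)))
      (PySem.Str.slice s (some (i + L)) none))
    (f := fun acc i => PySem.Set.add acc (PySem.Str.slice s (some i) (some (i + L))))]
  unfold pvListA pvSub PySem.Set.update
  rw [List.foldl_map]

lemma sum_map_range (c : Nat) (f : Nat → Int) :
    ((List.range c).map f).sum = ∑ k ∈ Finset.range c, f k := by
  rw [← Multiset.sum_coe]
  rfl

lemma listA_len (s : String) (L : Int) (hL : 1 ≤ L) :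
    ∀ x ∈ pvListA s L, ((x.toList.length : Int)) = L := by
  intro x hx
  rcases List.mem_map.mp hx with ⟨i, hi, hsub⟩
  rcases List.mem_filter.mp hi with ⟨hir, _⟩
  rcases PySem.List.mem_pyRange_one.mp hir with ⟨hi0, hilt⟩
  have hn : PySem.Str.len s = (s.toList.length : Int) := PySem.Str.len_eq s
  rw [← hsub]
  exact sub_len s L i hi0 (by omega) (by omega)

-- ===== VERDICT (by name: the statement is the Claim_ definition above) =====
theorem num_distinct_repeated_substrings_spec : Claim_equal_num_distinct_repeated_substrings := by
  unfold Claim_equal_num_distinct_repeated_substrings Spec_num_distinct_repeated_substrings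
  intro s _
  have hn : PySem.Str.len s = (s.toList.length : Int) := PySem.Str.len_eq s
  set N := s.toList.length with hN
  have hm : PySem.Int.floordiv (PySem.Str.len s) 2 = ((N / 2 : Nat) : Int) := by
    rw [hn]
    exact_mod_cast PySem.Int.floordiv_natCast N 2
  set c := N / 2 with hc
  -- A
  have hA : num_distinct_repeated_substrings s
      = ((List.range c).map
          (fun k : Nat => ((pvListA s ((c : Int) - (k : Int))).toFinset.card : Int))).sum := by
    simp only [num_distinct_repeated_substrings, PySem.Set.len, innerA_eq]
    rw [hm, pyRange_desc _ (Int.natCast_nonneg _), Int.toNat_natCast]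
    have hpair : ((List.range c).map (fun k : Nat => (c : Int) - (k : Int))).Pairwise (· ≠ ·) :=
      List.pairwise_lt_range.map _ (fun a b hab => by omega)
    have hlen1 : ∀ L ∈ (List.range c).map (fun k : Nat => (c : Int) - (k : Int)),
        ∀ x ∈ pvListA s L, ((x.toList.length : Int)) = L := by
      intro L hLm
      rcases List.mem_map.mp hLm with ⟨k, hk, rfl⟩
      rw [List.mem_range] at hk
      exact listA_len s _ (by omega)
    have hof := outer_fold s ((List.range c).map (fun k : Nat => (c : Int) - (k : Int)))
      PySem.Set.empty hpair (by intro x hx; cases hx) hlen1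
    rw [hof, List.map_map]
    show (0 : Int) + _ = _
    rw [zero_add]
    rfl
  -- B
  have hB : num_distinct_repeated_substrings_alt s
      = ((List.range c).map
          (fun k : Nat => ((pvListA s (1 + (k : Int))).toFinset.card : Int))).sum := by
    simp only [num_distinct_repeated_substrings_alt]
    rw [PySem.List.foldl_add]
    rw [zero_add, hm, pyRange_asc _ (Int.natCast_nonneg _), Int.toNat_natCast, List.map_map]
    congr 1
    apply List.map_congr_left
    intro k hk
    rw [List.mem_range] at hk
    simp only [Function.comp_apply]
    set L : Int := 1 + (k : Int) with hLdef
    have hL1 : 1 ≤ L := by omega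
    have hstep : (fun (occ : PySem.Dict String (Int × Int)) (i : Int) =>
        match occ.get? (PySem.Str.slice s (some i) (some (i + L))) with
        | some p => occ.insert (PySem.Str.slice s (some i) (some (i + L))) (p.1, i)
        | none => occ.insert (PySem.Str.slice s (some i) (some (i + L))) (i, i)) = pvStep s L := rfl
    rw [hstep]
    show (((pvIdxs s L).foldl (pvStep s L) PySem.Dict.empty).values.map
        (fun fl => if L ≤ fl.2 - fl.1 then (1 : Int) else 0)).sum
      = ((pvListA s L).toFinset.card : Int)
    rw [dict_count, core s L hL1]
  rw [hA, hB, sum_map_range, sum_map_range,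
    ← Finset.sum_range_reflect (fun k : Nat => ((pvListA s (1 + (k : Int))).toFinset.card : Int)) c]
  apply Finset.sum_congr rfl
  intro k hk
  rw [Finset.mem_range] at hk
  have harg : ((c : Int) - (k : Int)) = 1 + ((c - 1 - k : Nat) : Int) := by omega
  rw [harg]
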